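-- pv_equiv track=rewrite | github.com/dcross23/AoC2020 | Day20/p20.py | getMonsterCoordinates
-- ===== SOURCE A (Python) =====
-- def getMonsterCoordinates(monster):
--     coordinates = []
--     iFirstHastag = -1
--     jFirstHastag = -1
--     for i,line in enumerate(monster):
--         jFirstHastag = line.find('#')
--         if jFirstHastag != -1:
--             iFirstHastag = i
--             break
--
--     for i,line in enumerate(monster):
--         for j in range(len(line)):
--             if line[j] == '#':
--                 coordinates.append((i-iFirstHastag,j-jFirstHastag))
--
--     coordinates.remove((0,0))
--     return coordinates
-- ===== SOURCE B (Python) =====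
-- def getMonsterCoordinates(monster):
--     res = []
--     anchor = None
--     for i, line in enumerate(monster):
--         j = line.find('#')
--         while j != -1:
--             if anchor is None:
--                 anchor = (i, j)
--             else:
--                 res.append((i - anchor[0], j - anchor[1]))
--             j = line.find('#', j + 1)
--     return res
-- ===== Notes on version B (the rewrite author's own statement) =====
-- stated objective: alternative
-- what changed: B is a one-pass state machine that never indexes columns: it jumps from '#' to '#' with str.find(sub, start) inside each line, takes the first '#' it meets as the anchor, and emits every later offset directly, replacing A's staged find/break anchor scan, per-column nested loop and final remove((0,0)).
-- outside the precondition, e.g. on getMonsterCoordinates(['..', '.']): A raises ValueError, B returns []; on getMonsterCoordinates([]): A raises ValueError, B returns []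
-- crash fix: On grids containing no '#' at all, A raises ValueError from coordinates.remove((0,0)); B returns []. — e.g. on getMonsterCoordinates(["..", "."]): A raises ValueError, B returns []
import Mathlib
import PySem

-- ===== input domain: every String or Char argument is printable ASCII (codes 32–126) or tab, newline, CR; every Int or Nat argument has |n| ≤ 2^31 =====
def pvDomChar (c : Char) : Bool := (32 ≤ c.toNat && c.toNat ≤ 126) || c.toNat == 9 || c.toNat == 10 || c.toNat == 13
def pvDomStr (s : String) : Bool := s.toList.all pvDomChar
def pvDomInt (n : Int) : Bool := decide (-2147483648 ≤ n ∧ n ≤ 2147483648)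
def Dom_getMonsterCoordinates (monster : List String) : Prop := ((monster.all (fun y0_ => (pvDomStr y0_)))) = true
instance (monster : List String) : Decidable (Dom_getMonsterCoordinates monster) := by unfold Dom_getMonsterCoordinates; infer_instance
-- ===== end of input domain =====

-- B is a one-pass state machine jumping from '#' to '#' with str.find(sub, start),
-- replacing A's staged anchor scan, per-column loop and remove((0,0)); objective: alternative.

-- ===== PORT A =====
-- first for-loop with break: state is (iFirstHastag, jFirstHastag)
def gmcFindFirst : List (Int × String) → Int × Int → Int × Int
  | [], st => st
  | (i, line) :: rest, (iF, _) =>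
      let jF := PySem.Str.find line "#"
      if jF ≠ -1 then (i, jF) else gmcFindFirst rest (iF, jF)

def getMonsterCoordinates (monster : List String) : List (Int × Int) :=
  let st := gmcFindFirst (PySem.List.enumerate monster 0) (-1, -1)
  let coordinates :=
    (PySem.List.enumerate monster 0).foldl (fun acc p =>
      (PySem.List.pyRange 0 (PySem.Str.len p.2) 1).foldl (fun acc j =>
        if PySem.Str.pyGet? p.2 j = some '#' then acc ++ [(p.1 - st.1, j - st.2)] else acc) acc) []
  -- coordinates.remove((0,0)); none = ValueError, excluded by Pre_
  (PySem.List.remove? coordinates ((0 : Int), (0 : Int))).getD []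

-- ===== PORT B =====
-- inner while-loop: j jumps with line.find('#', j+1); fuel = line length + 1 only makes the
-- recursion structural (j strictly increases in Python, so the fuel is never exhausted)
def gmcAltInner (i : Int) (line : String) :
    Nat → Int → Option (Int × Int) → List (Int × Int) → Option (Int × Int) × List (Int × Int)
  | 0, _, anchor, res => (anchor, res)
  | fuel + 1, j, anchor, res =>
      if j = -1 then (anchor, res)
      else match anchor with
        | none => gmcAltInner i line fuel (PySem.Str.findFrom line "#" (j + 1) none) (some (i, j)) res
        | some a => gmcAltInner i line fuel (PySem.Str.findFrom line "#" (j + 1) none) (some a)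
            (res ++ [(i - a.1, j - a.2)])

def getMonsterCoordinates_alt (monster : List String) : List (Int × Int) :=
  let st := (PySem.List.enumerate monster 0).foldl
    (fun (st : Option (Int × Int) × List (Int × Int)) p =>
      gmcAltInner p.1 p.2 (p.2.toList.length + 1) (PySem.Str.find p.2 "#") st.1 st.2)
    (none, [])
  st.2

-- ===== PRECONDITION & SPEC =====
-- Pre_ excludes grids with no '#' at all, where A raises ValueError (remove((0,0)) on []).
def Pre_getMonsterCoordinates (monster : List String) : Prop :=
  monster.any (fun line => PySem.Str.isIn "#" line) = true
instance (monster : List String) : Decidable (Pre_getMonsterCoordinates monster) := by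
  unfold Pre_getMonsterCoordinates; infer_instance
def pvWitness_getMonsterCoordinates : List String := ["..#", "#.#"]

-- On grids containing no '#' at all, A raises ValueError from coordinates.remove((0,0)); B returns []
-- (made checkable by getMonsterCoordinates_raises at the bottom of the file).
def Raises_getMonsterCoordinates (monster : List String) : Prop :=
  monster.all (fun line => !(PySem.Str.isIn "#" line)) = true
instance (monster : List String) : Decidable (Raises_getMonsterCoordinates monster) := by
  unfold Raises_getMonsterCoordinates; infer_instance
def pvRaiseWitness_getMonsterCoordinates : List String := ["..", "."]
def pvRaiseWitnessOut_getMonsterCoordinates : List (Int × Int) := []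

def Spec_getMonsterCoordinates (monster : List String) (out : List (Int × Int)) : Prop := out = getMonsterCoordinates_alt monster
instance (monster : List String) (out : List (Int × Int)) : Decidable (Spec_getMonsterCoordinates monster out) := by unfold Spec_getMonsterCoordinates; infer_instance

-- ===== CLAIM (what is proved, stated in full; the proofs are below) =====
def Claim_equal_getMonsterCoordinates : Prop := ∀ (monster : List String), Dom_getMonsterCoordinates monster → Pre_getMonsterCoordinates monster → Spec_getMonsterCoordinates monster (getMonsterCoordinates monster)
def Claim_raises_getMonsterCoordinates : Prop := (∀ (monster : List String), Dom_getMonsterCoordinates monster → Raises_getMonsterCoordinates monster → ¬ Pre_getMonsterCoordinates monster) ∧ (Dom_getMonsterCoordinates (pvRaiseWitness_getMonsterCoordinates) ∧ Raises_getMonsterCoordinates (pvRaiseWitness_getMonsterCoordinates) ∧ getMonsterCoordinates_alt (pvRaiseWitness_getMonsterCoordinates) = pvRaiseWitnessOut_getMonsterCoordinates)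

-- ===== LEMMAS AND PROOFS =====

-- absolute coordinates of the '#' cells of cs, indexed from off
def gmcHashAbs (i : Int) (cs : List Char) (off : Int) : List (Int × Int) :=
  (PySem.List.enumerate cs off).filterMap (fun q =>
    if q.2 = '#' then some (i, q.1) else none)

-- absolute coordinates of the '#' cells of one line
def gmcLineAbs (i : Int) (line : String) : List (Int × Int) :=
  gmcHashAbs i line.toList 0

-- the per-hash transition of B's state machine
def gmcStep (st : Option (Int × Int) × List (Int × Int)) (c : Int × Int) :
    Option (Int × Int) × List (Int × Int) :=
  match st.1 with
  | none => (some c, st.2)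
  | some a => (some a, st.2 ++ [(c.1 - a.1, c.2 - a.2)])

theorem gmc_filter_map_eq_filterMap {α β : Type} (p : α → Bool) (f : α → β) (l : List α) :
    (l.filter p).map f = l.filterMap (fun a => if p a then some (f a) else none) := by
  induction l with
  | nil => rfl
  | cons x xs ih => by_cases h : p x <;> simp [h, ih]

theorem gmc_filterMap_enum_nil (i : Int) (cs : List Char) (s : Int)
    (h : ∀ c ∈ cs, c ≠ '#') :
    (PySem.List.enumerate cs s).filterMap (fun q =>
      if q.2 = '#' then some (i, q.1) else none) = [] := by
  rw [List.filterMap_eq_nil_iff]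
  intro q hq
  rw [PySem.List.mem_enumerate_iff] at hq
  obtain ⟨k, hk, rfl⟩ := hq
  simp [h cs[k] (cs.getElem_mem hk)]

theorem gmc_no_hash (cs : List Char) (h : PySem.Chars.find cs ['#'] = -1) :
    ∀ c ∈ cs, c ≠ '#' := by
  rw [PySem.Chars.find_eq_neg_one_iff] at h
  intro c hc hceq
  obtain ⟨k, hk, hkE⟩ := List.getElem_of_mem hc
  apply h
  exact ⟨cs.take k, cs.drop (k+1), by
    rw [List.append_assoc]
    have : '#' :: cs.drop (k+1) = cs.drop k := by
      rw [List.drop_eq_getElem_cons hk, hkE, hceq]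
    simp [this]⟩

-- a line with no '#' contributes nothing
theorem gmcLineAbs_of_no_hash (i : Int) (line : String)
    (h : PySem.Chars.find line.toList ['#'] = -1) : gmcLineAbs i line = [] :=
  gmc_filterMap_enum_nil i line.toList 0 (gmc_no_hash line.toList h)

-- a line containing '#' contributes its first '#' at column find(line,'#') first
theorem gmcLineAbs_of_hash (i : Int) (line : String)
    (h : PySem.Chars.find line.toList ['#'] ≠ -1) :
    ∃ tail, gmcLineAbs i line = (i, PySem.Chars.find line.toList ['#']) :: tail := by
  have hnn : 0 ≤ PySem.Chars.find line.toList ['#'] := by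
    rw [PySem.Chars.find_nonneg_iff, ← PySem.Chars.find_ne_neg_one_iff]; exact h
  obtain ⟨hpref, hmin⟩ := PySem.Chars.find_spec (s := line.toList) (sub := ['#']) hnn
  set k : Nat := (PySem.Chars.find line.toList ['#']).toNat with hkdef
  have hF : PySem.Chars.find line.toList ['#'] = (k : Int) := (Int.toNat_of_nonneg hnn).symm
  obtain ⟨t, ht⟩ := hpref
  have hdrop : line.toList.drop k = '#' :: t := by simpa using ht.symm
  have hsplit : line.toList = line.toList.take k ++ '#' :: t := by
    rw [← hdrop, List.take_append_drop]
  have hklen : k ≤ line.toList.length := by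
    by_contra hc
    rw [List.drop_eq_nil_of_le (by omega)] at hdrop
    exact absurd hdrop (by simp)
  have hlen : (line.toList.take k).length = k := by
    rw [List.length_take]; omega
  have htake : ∀ c ∈ line.toList.take k, c ≠ '#' := by
    intro c hc hceq
    obtain ⟨m, hm, hmE⟩ := List.getElem_of_mem hc
    have hmk : m < k := by
      have := hm; rw [List.length_take] at this; omega
    have hmlen : m < line.toList.length := by omega
    apply hmin m hmk
    refine ⟨line.toList.drop (m+1), ?_⟩
    rw [List.drop_eq_getElem_cons hmlen]
    have : line.toList[m] = c := by
      rw [← hmE, List.getElem_take]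
    rw [this, hceq]
    rfl
  refine ⟨(PySem.List.enumerate t ((k : Int) + 1)).filterMap (fun q =>
      if q.2 = '#' then some (i, q.1) else none), ?_⟩
  rw [hF]
  unfold gmcLineAbs gmcHashAbs
  conv_lhs => rw [hsplit]
  rw [PySem.List.enumerate_append, List.filterMap_append,
      gmc_filterMap_enum_nil i _ 0 htake, hlen, PySem.List.enumerate_cons]
  simp

theorem gmcFindFirst_found (l : String) (post : List String) (s : Int) (st : Int × Int)
    (h : PySem.Str.find l "#" ≠ -1) :
    gmcFindFirst (PySem.List.enumerate (l :: post) s) st = (s, PySem.Str.find l "#") := by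
  rw [PySem.List.enumerate_cons]
  obtain ⟨iF, jF⟩ := st
  have h' : PySem.Chars.find l.toList ['#'] ≠ -1 := by simpa using h
  simp [gmcFindFirst, h']

theorem gmcFindFirst_skip (pre : List String)
    (hpre : ∀ p ∈ pre, PySem.Str.find p "#" = -1) :
    ∀ (rest : List String) (s : Int) (st : Int × Int), ∃ st₂,
      gmcFindFirst (PySem.List.enumerate (pre ++ rest) s) st =
        gmcFindFirst (PySem.List.enumerate rest (s + pre.length)) st₂ := by
  induction pre with
  | nil => intro rest s st; exact ⟨st, by simp⟩
  | cons p pre' ih =>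
      intro rest s st
      have hp : PySem.Str.find p "#" = -1 := hpre p (by simp)
      obtain ⟨st₂, hst₂⟩ := ih (fun q hq => hpre q (by simp [hq])) rest (s + 1) (st.1, -1)
      refine ⟨st₂, ?_⟩
      rw [List.cons_append, PySem.List.enumerate_cons]
      obtain ⟨iF, jF⟩ := st
      simp only [gmcFindFirst, hp]
      rw [if_neg (by simp)]
      rw [hst₂]
      have : s + 1 + (pre'.length : Int) = s + ((pre'.length : Int) + 1) := by ring
      simp only [List.length_cons]
      push_cast
      rw [this]

-- a first-occurrence decomposition of a list containing an element satisfying P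
theorem gmc_first_split {α : Type} (P : α → Prop) [DecidablePred P] (ls : List α)
    (h : ∃ x ∈ ls, P x) :
    ∃ pre x post, ls = pre ++ x :: post ∧ P x ∧ ∀ y ∈ pre, ¬ P y := by
  induction ls with
  | nil => simp at h
  | cons a as ih =>
      by_cases ha : P a
      · exact ⟨[], a, as, by simp, ha, by simp⟩
      · obtain ⟨x, hx, hPx⟩ := h
        rcases List.mem_cons.mp hx with rfl | hx'
        · exact absurd hPx ha
        · obtain ⟨pre, x, post, heq, hPx', hpre⟩ := ih ⟨x, hx', hPx⟩
          exact ⟨a :: pre, x, post, by simp [heq], hPx', by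
            intro y hy
            rcases List.mem_cons.mp hy with rfl | hy'
            · exact ha
            · exact hpre y hy'⟩

-- one line of A's inner loop appends the mapped absolute coordinates of that line
theorem gmc_line_eq (iF jF i : Int) (line : String) (acc : List (Int × Int)) :
    (PySem.List.pyRange 0 (PySem.Str.len line) 1).foldl (fun acc j =>
      if PySem.Str.pyGet? line j = some '#' then acc ++ [(i - iF, j - jF)] else acc) acc
    = acc ++ (gmcLineAbs i line).map (fun r => (r.1 - iF, r.2 - jF)) := by
  rw [PySem.List.foldl_append_ite (p := fun j => PySem.Str.pyGet? line j = some '#')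
      (f := fun j => (i - iF, j - jF))]
  congr 1
  rw [gmc_filter_map_eq_filterMap]
  unfold gmcLineAbs gmcHashAbs
  rw [PySem.List.enumerate_eq_map_pyRange line.toList 'x', List.filterMap_map, List.map_filterMap]
  have hlen : PySem.Str.len line = PySem.List.len line.toList := by simp
  rw [hlen]
  apply List.filterMap_congr
  intro j hj
  rw [PySem.List.mem_pyRange_one] at hj
  obtain ⟨h0, h1⟩ := hj
  obtain ⟨m, rfl⟩ : ∃ m : Nat, j = (m : Int) := ⟨j.toNat, (Int.toNat_of_nonneg h0).symm⟩
  have hm : m < line.toList.length := by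
    have : (m : Int) < (line.toList.length : Int) := by simpa using h1
    exact_mod_cast this
  by_cases hc : line.toList[m] = '#'
  · simp [Function.comp, List.getElem?_eq_getElem hm, hc, PySem.List.pyGetD_natCast]
  · simp [Function.comp, List.getElem?_eq_getElem hm, hc, PySem.List.pyGetD_natCast]

-- A's coordinate-collecting double loop computes the map of the absolute coordinates
theorem gmc_coords_eq (monster : List String) (iF jF : Int) :
    (PySem.List.enumerate monster 0).foldl (fun acc p =>
      (PySem.List.pyRange 0 (PySem.Str.len p.2) 1).foldl (fun acc j =>
        if PySem.Str.pyGet? p.2 j = some '#' then acc ++ [(p.1 - iF, j - jF)] else acc) acc) [] =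
    ((PySem.List.enumerate monster 0).flatMap (fun p => gmcLineAbs p.1 p.2)).map
      (fun r => (r.1 - iF, r.2 - jF)) := by
  have h1 := List.foldl_ext
    (fun (acc : List (Int × Int)) (p : Int × String) =>
      (PySem.List.pyRange 0 (PySem.Str.len p.2) 1).foldl (fun acc j =>
        if PySem.Str.pyGet? p.2 j = some '#' then acc ++ [(p.1 - iF, j - jF)] else acc) acc)
    (fun acc p => acc ++ (gmcLineAbs p.1 p.2).map (fun r => (r.1 - iF, r.2 - jF)))
    ([] : List (Int × Int)) (l := PySem.List.enumerate monster 0)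
    (fun acc p _ => gmc_line_eq iF jF p.1 p.2 acc)
  rw [h1, PySem.List.foldl_append_eq_flatMap, List.nil_append, List.map_flatMap]

-- ===== B-side lemmas =====

-- with the anchor already set, the state machine just appends the offsets
theorem gmcStep_foldl_some (l : List (Int × Int)) (a : Int × Int) (res : List (Int × Int)) :
    l.foldl gmcStep (some a, res)
      = (some a, res ++ l.map (fun r => (r.1 - a.1, r.2 - a.2))) := by
  induction l generalizing res with
  | nil => simp
  | cons x xs ih => simp [gmcStep, ih, List.append_assoc]

-- gmcHashAbs of a hash-free block is empty
theorem gmcHashAbs_nil (i : Int) (cs : List Char) (off : Int)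
    (h : ∀ c ∈ cs, c ≠ '#') : gmcHashAbs i cs off = [] :=
  gmc_filterMap_enum_nil i cs off h

-- B's find-jump loop, started anywhere, runs the state machine over the remaining hashes
theorem gmc_jump (i : Int) (line : String) :
    ∀ (fuel k : Nat), k ≤ line.toList.length → line.toList.length - k < fuel →
    ∀ (anchor : Option (Int × Int)) (res : List (Int × Int)),
    gmcAltInner i line fuel (PySem.Chars.findFrom line.toList ['#'] (k : Int) none) anchor res
      = (gmcHashAbs i (line.toList.drop k) (k : Int)).foldl gmcStep (anchor, res) := by
  intro fuel
  induction fuel with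
  | zero => intro k hk hf; omega
  | succ f ih =>
      intro k hk hf anchor res
      rw [PySem.Chars.findFrom_natCast line.toList ['#'] k hk]
      by_cases hfind : PySem.Chars.find (line.toList.drop k) ['#'] = -1
      · rw [if_pos hfind]
        rw [gmcHashAbs_nil i _ _ (gmc_no_hash _ hfind)]
        cases anchor <;> simp [gmcAltInner]
      · rw [if_neg hfind]
        have hnn : 0 ≤ PySem.Chars.find (line.toList.drop k) ['#'] := by
          rw [PySem.Chars.find_nonneg_iff, ← PySem.Chars.find_ne_neg_one_iff]; exact hfind
        obtain ⟨hpref, hmin⟩ := PySem.Chars.find_spec (s := line.toList.drop k) (sub := ['#']) hnn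
        set p : Nat := (PySem.Chars.find (line.toList.drop k) ['#']).toNat with hpdef
        have hF : PySem.Chars.find (line.toList.drop k) ['#'] = (p : Int) :=
          (Int.toNat_of_nonneg hnn).symm
        obtain ⟨t, ht⟩ := hpref
        have h2 : (line.toList.drop k).drop p = '#' :: t := by simpa using ht.symm
        have hlendrop : (line.toList.drop k).length = line.toList.length - k := by
          simp
        have hkp : k + p < line.toList.length := by
          by_contra hcon
          rw [List.drop_eq_nil_of_le (by rw [hlendrop]; omega)] at h2
          exact absurd h2 (by simp)
        have hsplit : line.toList.drop k = (line.toList.drop k).take p ++ '#' :: t := by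
          conv_lhs => rw [← List.take_append_drop p (line.toList.drop k)]
          rw [h2]
        have htakelen : ((line.toList.drop k).take p).length = p := by
          rw [List.length_take]; omega
        have htake : ∀ c ∈ (line.toList.drop k).take p, c ≠ '#' := by
          intro c hc hceq
          obtain ⟨m, hm, hmE⟩ := List.getElem_of_mem hc
          have hmk : m < p := by rw [htakelen] at hm; exact hm
          apply hmin m hmk
          have hmlen : m < (line.toList.drop k).length := by omega
          refine ⟨(line.toList.drop k).drop (m+1), ?_⟩
          rw [List.drop_eq_getElem_cons hmlen]
          have : (line.toList.drop k)[m] = c := by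
            rw [← hmE, List.getElem_take]
          rw [this, hceq]
          rfl
        have hc : ((k + p + 1 : Nat) : Int) = (k : Int) + p + 1 := by push_cast; ring
        have ht' : line.toList.drop (k + p + 1) = t := by
          have hd : line.toList.drop (k + p) = '#' :: t := by
            rw [← List.drop_drop]; exact h2
          have hstep : line.toList.drop (k + p + 1) = (line.toList.drop (k + p)).drop 1 := by
            rw [List.drop_drop]
          rw [hstep, hd]
          simp
        -- decompose the hash list: first hash at column k+p, rest from k+p+1
        have hhash : gmcHashAbs i (line.toList.drop k) (k : Int)
            = (i, (k : Int) + p) :: gmcHashAbs i t ((k : Int) + p + 1) := by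
          unfold gmcHashAbs
          conv_lhs => rw [hsplit]
          rw [PySem.List.enumerate_append, List.filterMap_append,
              gmc_filterMap_enum_nil i _ _ htake, htakelen, PySem.List.enumerate_cons]
          simp [add_assoc]
        have hnext : PySem.Str.findFrom line "#" ((k : Int) + p + 1) none
            = PySem.Chars.findFrom line.toList ['#'] ((k + p + 1 : Nat) : Int) none := by
          rw [hc]; simp
        have hij : ¬((k : Int) + (p : Int) = -1) := by omega
        have hIH := ih (k + p + 1) (by omega) (by omega)
        rw [hF]
        cases anchor with
        | none =>
            rw [hhash]
            simp only [gmcAltInner, if_neg hij]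
            rw [hnext, hIH (some (i, (k : Int) + p)) res, ht', hc]
            simp [gmcStep]
        | some a =>
            rw [hhash]
            simp only [gmcAltInner, if_neg hij]
            rw [hnext, hIH (some a) (res ++ [(i - a.1, (k : Int) + p - a.2)]), ht', hc]
            simp [gmcStep]

-- one line of B: the jump loop from find(line,'#') is the state machine over that line's hashes
theorem gmc_line_jump (i : Int) (line : String) (anchor : Option (Int × Int))
    (res : List (Int × Int)) :
    gmcAltInner i line (line.toList.length + 1) (PySem.Str.find line "#") anchor res
      = (gmcLineAbs i line).foldl gmcStep (anchor, res) := by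
  have h := gmc_jump i line (line.toList.length + 1) 0 (by omega) (by omega) anchor res
  simpa [gmcLineAbs, gmcHashAbs] using h

-- B's outer loop runs the state machine over all hashes in row-major order
theorem gmc_outer (e : List (Int × String)) :
    ∀ st, e.foldl (fun (st : Option (Int × Int) × List (Int × Int)) p =>
        gmcAltInner p.1 p.2 (p.2.toList.length + 1) (PySem.Str.find p.2 "#") st.1 st.2) st
      = (e.flatMap (fun p => gmcLineAbs p.1 p.2)).foldl gmcStep st := by
  induction e with
  | nil => intro st; rfl
  | cons x xs ih =>
      intro st
      rw [List.foldl_cons, List.flatMap_cons, List.foldl_append, ← ih]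
      rw [gmc_line_jump x.1 x.2 st.1 st.2]

-- ===== VERDICT (by name: the statement is the Claim_ definition above) =====
theorem getMonsterCoordinates_spec : Claim_equal_getMonsterCoordinates := by
  intro monster _ hPre
  unfold Spec_getMonsterCoordinates
  unfold Pre_getMonsterCoordinates at hPre
  rw [List.any_eq_true] at hPre
  obtain ⟨l₀, hl₀mem, hl₀⟩ := hPre
  have hex : ∃ x ∈ monster, PySem.Str.find x "#" ≠ -1 := by
    refine ⟨l₀, hl₀mem, ?_⟩
    rw [PySem.Str.find_eq, PySem.Chars.find_ne_neg_one_iff]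
    have h1 : PySem.Str.isIn "#" l₀ = true := by simpa using hl₀
    have h2 := (PySem.Str.isIn_iff_infix "#" l₀).mp h1
    simpa using h2
  obtain ⟨pre, l, post, heq, hl, hpre⟩ :=
    gmc_first_split (fun x => PySem.Str.find x "#" ≠ -1) monster hex
  have hpre' : ∀ p ∈ pre, PySem.Str.find p "#" = -1 := fun p hp => not_not.mp (hpre p hp)
  obtain ⟨st₂, hskip⟩ := gmcFindFirst_skip pre hpre' (l :: post) 0 (-1, -1)
  have hfound := gmcFindFirst_found l post (0 + (pre.length : Int)) st₂ hl
  have hst : gmcFindFirst (PySem.List.enumerate monster 0) (-1, -1)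
      = ((pre.length : Int), PySem.Str.find l "#") := by
    rw [heq, hskip, hfound, zero_add]
  have hlC : PySem.Chars.find l.toList ['#'] ≠ -1 := by
    simpa [PySem.Str.find_eq] using hl
  obtain ⟨tail, htail⟩ := gmcLineAbs_of_hash ((pre.length : Int)) l hlC
  have habs : (PySem.List.enumerate monster 0).flatMap (fun p => gmcLineAbs p.1 p.2)
      = ((pre.length : Int), PySem.Str.find l "#") ::
        (tail ++ (PySem.List.enumerate post ((pre.length : Int) + 1)).flatMap
          (fun p => gmcLineAbs p.1 p.2)) := by
    rw [heq, PySem.List.enumerate_append, List.flatMap_append]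
    have hnil : (PySem.List.enumerate pre 0).flatMap (fun p => gmcLineAbs p.1 p.2) = [] := by
      rw [List.flatMap_eq_nil_iff]
      intro p hp
      rw [PySem.List.mem_enumerate_iff] at hp
      obtain ⟨k, hk, rfl⟩ := hp
      apply gmcLineAbs_of_no_hash
      have := hpre' pre[k] (pre.getElem_mem hk)
      simpa [PySem.Str.find_eq] using this
    rw [hnil, List.nil_append, zero_add, PySem.List.enumerate_cons, List.flatMap_cons]
    rw [htail, PySem.Str.find_eq, List.cons_append]
    rfl
  have hA : getMonsterCoordinates monster =
      (tail ++ (PySem.List.enumerate post ((pre.length : Int) + 1)).flatMap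
        (fun p => gmcLineAbs p.1 p.2)).map
        (fun r => (r.1 - (pre.length : Int), r.2 - PySem.Str.find l "#")) := by
    unfold getMonsterCoordinates
    simp only [hst]
    rw [gmc_coords_eq monster ((pre.length : Int)) (PySem.Str.find l "#"), habs,
      List.map_cons]
    simp [PySem.List.remove?_cons_self]
  have hB : getMonsterCoordinates_alt monster =
      (tail ++ (PySem.List.enumerate post ((pre.length : Int) + 1)).flatMap
        (fun p => gmcLineAbs p.1 p.2)).map
        (fun r => (r.1 - (pre.length : Int), r.2 - PySem.Str.find l "#")) := by
    unfold getMonsterCoordinates_alt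
    rw [gmc_outer, habs, List.foldl_cons]
    have hstep : gmcStep (none, []) ((pre.length : Int), PySem.Str.find l "#")
        = (some ((pre.length : Int), PySem.Str.find l "#"), []) := rfl
    rw [hstep, gmcStep_foldl_some]
    simp
  rw [hA, hB]

theorem getMonsterCoordinates_raises : Claim_raises_getMonsterCoordinates := by
  unfold Claim_raises_getMonsterCoordinates
  refine ⟨?_, by decide⟩
  intro monster _ hR hP
  unfold Raises_getMonsterCoordinates at hR
  unfold Pre_getMonsterCoordinates at hP
  rw [List.all_eq_true] at hR
  rw [List.any_eq_true] at hP
  obtain ⟨l, hl, hIn⟩ := hP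
  have := hR l hl
  simp at this hIn
  exact absurd hIn (by simp [this])

-- self-check: the stated raise witness really lies inside Raises_ (reads the theorem above)
theorem gmc_raise_witness_ok :
    Raises_getMonsterCoordinates pvRaiseWitness_getMonsterCoordinates :=
  getMonsterCoordinates_raises.2.2.1
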